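-- pv_equiv track=rewrite | github.com/attwad/hikibuta | rule_parser.py | _get_within_spaces
-- ===== SOURCE A (Python) =====
-- def _get_within_spaces(s, start):
--   end_index = start
--   in_quotes = False
--   while end_index < len(s) and (s[end_index] != ' ' or in_quotes):
--     if s[end_index] == '"':
--       in_quotes = not in_quotes
--     end_index += 1
--   return end_index
-- ===== SOURCE B (Python) =====
-- def _get_within_spaces(s, start):
--   t = s[start:]
--   consumed = 0
--   while t and t[0] != ' ':
--     if t[0] == '"':
--       j = t[1:].find('"')
--       step = len(t) if j == -1 else j + 2
--     else:
--       j = t.find(' ')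
--       q = t.find('"')
--       if q != -1 and (j == -1 or q < j):
--         j = q
--       step = len(t) if j == -1 else j
--     consumed += step
--     t = t[step:]
--   return start + consumed
-- ===== Notes on version B (the rewrite author's own statement) =====
-- stated objective: faster
-- what changed: Replaces the char-by-char index loop with an in_quotes boolean by a chunked scan of the remaining suffix: it slices off whole pieces at a time (a complete quoted block located with str.find of the closing quote, or a run of ordinary characters up to the next space/quote), so the per-character interpreted loop is replaced by C-level find/slice calls.
-- outside the precondition, e.g. on _get_within_spaces('ab', -1): A returns 2, B returns 0
import Mathlib
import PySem

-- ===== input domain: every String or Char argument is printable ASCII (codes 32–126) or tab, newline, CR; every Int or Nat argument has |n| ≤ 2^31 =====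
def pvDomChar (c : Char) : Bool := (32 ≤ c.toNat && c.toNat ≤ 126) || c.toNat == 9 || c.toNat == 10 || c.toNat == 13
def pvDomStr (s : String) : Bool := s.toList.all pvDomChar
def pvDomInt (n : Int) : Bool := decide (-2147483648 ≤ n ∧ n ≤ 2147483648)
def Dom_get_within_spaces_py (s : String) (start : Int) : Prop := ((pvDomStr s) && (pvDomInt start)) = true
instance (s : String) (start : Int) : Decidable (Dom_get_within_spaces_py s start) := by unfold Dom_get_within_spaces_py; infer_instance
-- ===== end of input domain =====

-- B drops A's per-character loop with an in_quotes flag: it walks the remaining suffix in whole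
-- chunks (a quoted block, or a run up to the next space/quote) located with str.find
-- (measured faster in a timing run: find/slice run in C, not per-char bytecode).

-- ===== PORT A =====
-- while end_index < len(s) and (s[end_index] != ' ' or in_quotes): toggle on '"', end_index += 1
-- fuel = number of remaining possible iterations; at fuel 0 the loop guard i < n is already false on Pre_
def pvALoop (s : String) (n : Int) : Nat → Int → Bool → Int
  | 0, i, _ => i
  | f + 1, i, q =>
    if i < n then
      match PySem.Str.pyGet? s i with
      | none => i   -- s[end_index] raises IndexError (outside Pre_)
      | some c =>
        if (c != ' ' || q) then
          pvALoop s n f (i + 1) (if c == '"' then !q else q)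
        else i
    else i

def get_within_spaces_py (s : String) (start : Int) : Int :=
  pvALoop s (PySem.Str.len s) (PySem.Str.len s - start).toNat start false

-- ===== PORT B =====
-- t.find(c) for a single character c, characterised by takeWhile (needed by the port's termination)
lemma pvFindGoChar (c : Char) : ∀ (t : List Char) (k : Nat),
    PySem.Chars.find.go [c] t k =
      if c ∈ t then (((k + (t.takeWhile (fun x => !(x == c))).length : Nat)) : Int) else -1 := by
  intro t
  induction t with
  | nil => intro k; simp [PySem.Chars.find.go]
  | cons d r ih =>
    intro k
    by_cases h : d = c
    · subst h; simp [PySem.Chars.find.go, List.isPrefixOf]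
    · have hpre : ([c].isPrefixOf (d :: r)) = false := by
        simp [List.isPrefixOf]; intro hc; exact h hc.symm
      have hne : (d == c) = false := by simp [h]
      have hmem1 : (c ∈ d :: r) = (c ∈ r) := by
        rw [eq_iff_iff, List.mem_cons]
        constructor
        · rintro (hc | hc)
          · exact absurd hc.symm h
          · exact hc
        · exact Or.inr
      by_cases hm : c ∈ r
      · simp [PySem.Chars.find.go, hpre, ih (k + 1), hm, hmem1, hne]; push_cast; ring
      · simp [PySem.Chars.find.go, hpre, ih (k + 1), hm, hmem1]

lemma pvFindChar (t : List Char) (c : Char) :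
    PySem.Chars.find t [c] =
      if c ∈ t then ((t.takeWhile (fun x => !(x == c))).length : Int) else -1 := by
  have h := pvFindGoChar c t 0
  simpa [PySem.Chars.find] using h

-- step = len(t) if j == -1 else … as computed by Source B for t = c :: rest
-- combined choice of j and the final step in the ordinary branch
def pvStep2 (js q : Int) (n : Nat) : Int :=
  if (if q ≠ -1 ∧ (js = -1 ∨ q < js) then q else js) = -1 then (n : Int)
  else (if q ≠ -1 ∧ (js = -1 ∨ q < js) then q else js)

def pvStep (c : Char) (rest : List Char) : Int :=
  if c = '"' then
    (if PySem.Chars.find rest ['"'] = -1 then ((c :: rest).length : Int)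
     else PySem.Chars.find rest ['"'] + 2)
  else
    pvStep2 (PySem.Chars.find (c :: rest) [' ']) (PySem.Chars.find (c :: rest) ['"'])
      (c :: rest).length

lemma pvStep2_pos (js q : Int) (n : Nat) (h1 : 1 ≤ n)
    (hjs : js = -1 ∨ 1 ≤ js) (hq : q = -1 ∨ 1 ≤ q) : 1 ≤ pvStep2 js q n := by
  unfold pvStep2
  split_ifs with h2 h3 h3 <;> omega

lemma pvStep_pos (c : Char) (rest : List Char) (hc : ¬ c = ' ') : 1 ≤ pvStep c rest := by
  unfold pvStep
  by_cases hq : c = '"'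
  · rw [if_pos hq, pvFindChar]
    by_cases hm : '"' ∈ rest
    · rw [if_pos hm, if_neg (by simp)]
      omega
    · rw [if_neg hm, if_pos rfl]
      simp only [List.length_cons]; push_cast; omega
  · rw [if_neg hq]
    apply pvStep2_pos _ _ _ (by simp only [List.length_cons]; omega)
    · rw [pvFindChar]
      by_cases hm : ' ' ∈ c :: rest
      · right
        rw [if_pos hm, List.takeWhile_cons_of_pos (by simp [hc])]
        simp
      · left; rw [if_neg hm]
    · rw [pvFindChar]
      by_cases hm : '"' ∈ c :: rest
      · right
        rw [if_pos hm, List.takeWhile_cons_of_pos (by simp [hq])]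
        simp
      · left; rw [if_neg hm]

lemma pvSliceLt (c : Char) (rest : List Char) (step : Int) (hs : 1 ≤ step) :
    (PySem.List.slice (c :: rest) (some step) none).length < (c :: rest).length := by
  rw [PySem.List.slice_some_none, List.length_drop]
  have h1 : 1 ≤ PySem.List.clampIdx (c :: rest).length step := by
    unfold PySem.List.clampIdx
    rw [if_neg (by omega)]
    simp only [List.length_cons]
    omega
  simp only [List.length_cons] at *
  omega

def pvBLoop : List Char → Int → Int
  | [], consumed => consumed
  | c :: rest, consumed =>
    if c = ' ' then consumed
    else
      pvBLoop (PySem.List.slice (c :: rest) (some (pvStep c rest)) none)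
        (consumed + pvStep c rest)
termination_by t _ => t.length
decreasing_by
  exact pvSliceLt c rest _ (pvStep_pos c rest (by assumption))

def get_within_spaces_py_alt (s : String) (start : Int) : Int :=
  start + pvBLoop (PySem.Chars.slice s.toList (some start) none) 0

-- ===== PRECONDITION & SPEC =====
-- Pre_ excludes negative start: there A either raises IndexError (start < -len(s)) or returns a
-- value produced by Python's negative-index wraparound (it reads s[len+start] and then continues
-- from s[0]), an accident of the implementation that B's suffix-slice scan does not reproduce.
def Pre_get_within_spaces_py (s : String) (start : Int) : Prop := 0 ≤ start
instance (s : String) (start : Int) : Decidable (Pre_get_within_spaces_py s start) := by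
  unfold Pre_get_within_spaces_py; infer_instance

def pvWitness_get_within_spaces_py : String × Int := ("ab \"c d\" e", 0)

def Spec_get_within_spaces_py (s : String) (start : Int) (out : Int) : Prop := out = get_within_spaces_py_alt s start
instance (s : String) (start : Int) (out : Int) : Decidable (Spec_get_within_spaces_py s start out) := by unfold Spec_get_within_spaces_py; infer_instance

-- ===== CLAIM (what is proved, stated in full; the proofs are below) =====
def Claim_equal_get_within_spaces_py : Prop := ∀ (s : String) (start : Int), Dom_get_within_spaces_py s start → Pre_get_within_spaces_py s start → Spec_get_within_spaces_py s start (get_within_spaces_py s start)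

-- ===== LEMMAS AND PROOFS =====

-- value of A's loop on a suffix: chars consumed starting in quote-state q
def pvSpecA : List Char → Bool → Nat
  | [], _ => 0
  | c :: rest, q =>
    if (c != ' ' || q) then pvSpecA rest (if c == '"' then !q else q) + 1 else 0

-- an "ordinary" character: neither space nor quote
def pvOrd (x : Char) : Bool := !(x == ' ') && !(x == '"')

lemma pvSpecA_run : ∀ t : List Char,
    pvSpecA t false = (t.takeWhile pvOrd).length + pvSpecA (t.dropWhile pvOrd) false := by
  intro t
  induction t with
  | nil => simp [pvSpecA]
  | cons c r ih =>
    by_cases h : pvOrd c = true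
    · have hs : ¬ c = ' ' := by simp [pvOrd] at h; intro hc; exact absurd hc h.1
      have hq : ¬ c = '"' := by simp [pvOrd] at h; intro hc; exact absurd hc h.2
      have h1 : pvSpecA (c :: r) false = pvSpecA r false + 1 := by
        simp [pvSpecA, hs, hq]
      rw [h1, List.takeWhile_cons_of_pos h, List.dropWhile_cons_of_pos h, ih]
      simp; omega
    · have h' : pvOrd c = false := by simpa using h
      rw [List.takeWhile_cons_of_neg (by simp [h']), List.dropWhile_cons_of_neg (by simp [h'])]
      simp

lemma pvSpecA_quote : ∀ t : List Char,
    pvSpecA t true =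
      if '"' ∈ t then
        ((t.takeWhile (fun x => !(x == '"'))).length + 1) +
          pvSpecA (t.drop ((t.takeWhile (fun x => !(x == '"'))).length + 1)) false
      else t.length := by
  intro t
  induction t with
  | nil => simp [pvSpecA]
  | cons c r ih =>
    by_cases h : c = '"'
    · subst h
      have h1 : pvSpecA ('"' :: r) true = pvSpecA r false + 1 := by simp [pvSpecA]
      simp [h1, List.takeWhile_cons_of_neg]; omega
    · have hne : (c == '"') = false := by simp [h]
      have h1 : pvSpecA (c :: r) true = pvSpecA r true + 1 := by simp [pvSpecA, hne]
      rw [h1, ih]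
      by_cases hm : '"' ∈ r
      · have hmem : '"' ∈ c :: r := List.mem_cons_of_mem _ hm
        rw [if_pos hm, if_pos hmem, List.takeWhile_cons_of_pos (by simp [h])]
        simp; omega
      · have hmem : '"' ∉ c :: r := by simp [hm, h]; intro hc; exact h hc.symm
        rw [if_neg hm, if_neg hmem]
        simp

lemma pvTakeWhile_lt {t : List Char} {p : Char → Bool} {x : Char}
    (hx : x ∈ t) (hp : p x = false) : (t.takeWhile p).length < t.length := by
  have hd : t.dropWhile p ≠ [] := by
    intro hnil
    have := (List.dropWhile_eq_nil_iff).mp hnil x hx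
    rw [hp] at this; exact Bool.false_ne_true this
  have hlen : (t.takeWhile p).length + (t.dropWhile p).length = t.length := by
    have h := congrArg List.length (List.takeWhile_append_dropWhile (p := p) (l := t))
    rw [List.length_append] at h
    exact h
  have : 0 < (t.dropWhile p).length := List.length_pos_of_ne_nil hd
  omega

lemma pvDropWhile_eq_drop (t : List Char) (p : Char → Bool) :
    t.dropWhile p = t.drop (t.takeWhile p).length := by
  nth_rewrite 3 [← List.takeWhile_append_dropWhile (p := p) (l := t)]
  rw [List.drop_left]

-- takeWhile of a conjunction: stops at the first failure of either conjunct
lemma pvTakeWhile_and : ∀ (t : List Char) (p q : Char → Bool),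
    (t.takeWhile (fun x => p x && q x)).length =
      min (t.takeWhile p).length (t.takeWhile q).length := by
  intro t
  induction t with
  | nil => intro p q; simp
  | cons c r ih =>
    intro p q
    by_cases hp : p c = true
    · by_cases hq : q c = true
      · rw [List.takeWhile_cons_of_pos (by simp only [hp, hq, Bool.and_self]),
          List.takeWhile_cons_of_pos hp, List.takeWhile_cons_of_pos hq]
        simp only [List.length_cons, ih p q]
        omega
      · have hq' : q c = false := by simpa using hq
        have e1 : List.takeWhile (fun x => p x && q x) (c :: r) = [] :=
          List.takeWhile_cons_of_neg (by intro hcc; rw [hq'] at hcc; simp at hcc)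
        have e2 : List.takeWhile q (c :: r) = [] :=
          List.takeWhile_cons_of_neg (by simp [hq'])
        rw [e1, e2]
        simp only [List.length_nil]
        omega
    · have hp' : p c = false := by simpa using hp
      have e1 : List.takeWhile (fun x => p x && q x) (c :: r) = [] :=
        List.takeWhile_cons_of_neg (by intro hcc; rw [hp'] at hcc; simp at hcc)
      have e2 : List.takeWhile p (c :: r) = [] :=
        List.takeWhile_cons_of_neg (by simp [hp'])
      rw [e1, e2]
      simp only [List.length_nil]
      omega

-- the step Source B takes in the ordinary branch is exactly the length of the ordinary run
lemma pvStep_ord (c : Char) (rest : List Char) (hs : ¬ c = ' ') (hq : ¬ c = '"') :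
    pvStep c rest =
      if ((c :: rest).dropWhile pvOrd) = [] then ((c :: rest).length : Int)
      else (((c :: rest).takeWhile pvOrd).length : Int) := by
  have hand : ((c :: rest).takeWhile pvOrd).length =
      min ((c :: rest).takeWhile (fun x => !(x == ' '))).length
          ((c :: rest).takeWhile (fun x => !(x == '"'))).length := by
    have := pvTakeWhile_and (c :: rest) (fun x => !(x == ' ')) (fun x => !(x == '"'))
    simpa [pvOrd] using this
  unfold pvStep
  rw [if_neg hq]
  unfold pvStep2
  rw [pvFindChar, pvFindChar]
  by_cases hms : ' ' ∈ c :: rest <;> by_cases hmq : '"' ∈ c :: rest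
  · have ha : ((c :: rest).takeWhile (fun x => !(x == ' '))).length < (c :: rest).length :=
      pvTakeWhile_lt hms (by simp)
    have hb : ((c :: rest).takeWhile (fun x => !(x == '"'))).length < (c :: rest).length :=
      pvTakeWhile_lt hmq (by simp)
    have hdne : ((c :: rest).dropWhile pvOrd) ≠ [] := by
      rw [ne_eq, List.dropWhile_eq_nil_iff]
      push_neg
      exact ⟨' ', hms, by simp [pvOrd]⟩
    have hm1 : (List.takeWhile pvOrd (c :: rest)).length ≤
        (List.takeWhile (fun x => !(x == ' ')) (c :: rest)).length := by
      rw [hand]; exact Nat.min_le_left _ _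
    have hm2 : (List.takeWhile pvOrd (c :: rest)).length ≤
        (List.takeWhile (fun x => !(x == '"')) (c :: rest)).length := by
      rw [hand]; exact Nat.min_le_right _ _
    have hm3 : (List.takeWhile pvOrd (c :: rest)).length =
        (List.takeWhile (fun x => !(x == ' ')) (c :: rest)).length ∨
        (List.takeWhile pvOrd (c :: rest)).length =
        (List.takeWhile (fun x => !(x == '"')) (c :: rest)).length := by
      rw [hand]; exact min_choice _ _
    rw [if_pos hms, if_pos hmq, if_neg hdne]
    split_ifs <;> first | omega | tauto
  · have ha : ((c :: rest).takeWhile (fun x => !(x == ' '))).length < (c :: rest).length :=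
      pvTakeWhile_lt hms (by simp)
    have hbl : ((c :: rest).takeWhile (fun x => !(x == '"'))).length = (c :: rest).length := by
      rw [List.takeWhile_eq_self_iff.mpr (by
        intro x hx; simp; intro hx'; exact hmq (hx' ▸ hx))]
    have hdne : ((c :: rest).dropWhile pvOrd) ≠ [] := by
      rw [ne_eq, List.dropWhile_eq_nil_iff]
      push_neg
      exact ⟨' ', hms, by simp [pvOrd]⟩
    have hm1 : (List.takeWhile pvOrd (c :: rest)).length ≤
        (List.takeWhile (fun x => !(x == ' ')) (c :: rest)).length := by
      rw [hand]; exact Nat.min_le_left _ _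
    have hm2 : (List.takeWhile pvOrd (c :: rest)).length ≤
        (List.takeWhile (fun x => !(x == '"')) (c :: rest)).length := by
      rw [hand]; exact Nat.min_le_right _ _
    have hm3 : (List.takeWhile pvOrd (c :: rest)).length =
        (List.takeWhile (fun x => !(x == ' ')) (c :: rest)).length ∨
        (List.takeWhile pvOrd (c :: rest)).length =
        (List.takeWhile (fun x => !(x == '"')) (c :: rest)).length := by
      rw [hand]; exact min_choice _ _
    rw [if_pos hms, if_neg hmq, if_neg hdne]
    split_ifs <;> first | omega | tauto
  · have hb : ((c :: rest).takeWhile (fun x => !(x == '"'))).length < (c :: rest).length :=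
      pvTakeWhile_lt hmq (by simp)
    have hal : ((c :: rest).takeWhile (fun x => !(x == ' '))).length = (c :: rest).length := by
      rw [List.takeWhile_eq_self_iff.mpr (by
        intro x hx; simp; intro hx'; exact hms (hx' ▸ hx))]
    have hdne : ((c :: rest).dropWhile pvOrd) ≠ [] := by
      rw [ne_eq, List.dropWhile_eq_nil_iff]
      push_neg
      exact ⟨'"', hmq, by simp [pvOrd]⟩
    have hm1 : (List.takeWhile pvOrd (c :: rest)).length ≤
        (List.takeWhile (fun x => !(x == ' ')) (c :: rest)).length := by
      rw [hand]; exact Nat.min_le_left _ _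
    have hm2 : (List.takeWhile pvOrd (c :: rest)).length ≤
        (List.takeWhile (fun x => !(x == '"')) (c :: rest)).length := by
      rw [hand]; exact Nat.min_le_right _ _
    have hm3 : (List.takeWhile pvOrd (c :: rest)).length =
        (List.takeWhile (fun x => !(x == ' ')) (c :: rest)).length ∨
        (List.takeWhile pvOrd (c :: rest)).length =
        (List.takeWhile (fun x => !(x == '"')) (c :: rest)).length := by
      rw [hand]; exact min_choice _ _
    rw [if_neg hms, if_pos hmq, if_neg hdne]
    split_ifs <;> first | omega | tauto
  · have hdnil : ((c :: rest).dropWhile pvOrd) = [] := by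
      rw [List.dropWhile_eq_nil_iff]
      intro x hx
      simp [pvOrd]
      constructor
      · intro hx'; exact hms (hx' ▸ hx)
      · intro hx'; exact hmq (hx' ▸ hx)
    rw [if_neg hms, if_neg hmq, if_pos hdnil]
    split_ifs <;> first | omega | tauto

lemma pvBLoop_spec : ∀ (N : Nat) (t : List Char), t.length ≤ N → ∀ consumed : Int,
    pvBLoop t consumed = consumed + (pvSpecA t false : Int) := by
  intro N
  induction N with
  | zero =>
    intro t ht consumed
    have h : t = [] := by cases t with
      | nil => rfl
      | cons c r => simp at ht
    subst h; simp [pvBLoop, pvSpecA]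
  | succ N ih =>
    intro t ht consumed
    cases t with
    | nil => simp [pvBLoop, pvSpecA]
    | cons c rest =>
      by_cases hsp : c = ' '
      · subst hsp
        have h0 : pvSpecA (' ' :: rest) false = 0 := by simp [pvSpecA]
        simp [pvBLoop, h0]
      · rw [pvBLoop]
        rw [if_neg hsp]
        by_cases hq : c = '"'
        · -- quoted-block step
          subst hq
          have hstepq : pvStep '"' rest =
              if '"' ∈ rest then ((rest.takeWhile (fun x => !(x == '"'))).length : Int) + 2
              else (('"' :: rest).length : Int) := by
            unfold pvStep
            rw [if_pos rfl, pvFindChar]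
            by_cases hm : '"' ∈ rest
            · rw [if_pos hm, if_pos hm, if_neg (by simp)]
            · rw [if_neg hm, if_neg hm, if_pos rfl]
          have hA : pvSpecA ('"' :: rest) false = pvSpecA rest true + 1 := by simp [pvSpecA]
          by_cases hm : '"' ∈ rest
          · set m := (rest.takeWhile (fun x => !(x == '"'))).length with hmdef
            have hmlt : m < rest.length := pvTakeWhile_lt hm (by simp)
            have hstep : pvStep '"' rest = ((m : Int) + 2) := by rw [hstepq, if_pos hm]
            have hslice : PySem.List.slice ('"' :: rest) (some ((m : Int) + 2)) none =
                ('"' :: rest).drop (m + 2) := by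
              have : ((m : Int) + 2) = ((m + 2 : Nat) : Int) := by push_cast; ring
              rw [this, PySem.List.slice_from_natCast]
            have hlen : (('"' :: rest).drop (m + 2)).length ≤ N := by
              simp only [List.length_drop, List.length_cons] at *
              omega
            rw [hstep, hslice, ih _ hlen]
            rw [hA, pvSpecA_quote, if_pos hm, ← hmdef]
            have hdrop : rest.drop (m + 1) = ('"' :: rest).drop (m + 2) := rfl
            rw [hdrop]
            push_cast; ring
          · have hstep : pvStep '"' rest = (('"' :: rest).length : Int) := by
              rw [hstepq, if_neg hm]
            have hslice : PySem.List.slice ('"' :: rest) (some ((('"' :: rest).length : Nat) : Int)) none =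
                ('"' :: rest).drop ('"' :: rest).length := PySem.List.slice_from_natCast _ _
            rw [hstep, hslice]
            rw [List.drop_length]
            have h0 : pvBLoop [] (consumed + (('"' :: rest).length : Int)) =
                consumed + (('"' :: rest).length : Int) := by simp [pvBLoop]
            rw [h0, hA, pvSpecA_quote, if_neg hm]
            simp
        · -- ordinary-run step
          rw [pvStep_ord c rest hsp hq]
          by_cases hdnil : ((c :: rest).dropWhile pvOrd) = []
          · rw [if_pos hdnil]
            have hslice : PySem.List.slice (c :: rest) (some (((c :: rest).length : Nat) : Int)) none =
                (c :: rest).drop (c :: rest).length := PySem.List.slice_from_natCast _ _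
            rw [hslice, List.drop_length]
            have h0 : pvBLoop [] (consumed + ((c :: rest).length : Int)) =
                consumed + ((c :: rest).length : Int) := by simp [pvBLoop]
            rw [h0, pvSpecA_run (c :: rest), hdnil]
            have htake : ((c :: rest).takeWhile pvOrd).length = (c :: rest).length := by
              have := congrArg List.length (List.takeWhile_append_dropWhile (p := pvOrd) (l := c :: rest))
              rw [hdnil] at this
              simpa using this
            simp [pvSpecA, htake]
          · rw [if_neg hdnil]
            set m := ((c :: rest).takeWhile pvOrd).length with hmdef
            have hm1 : 1 ≤ m := by
              rw [hmdef, List.takeWhile_cons_of_pos (by simp [pvOrd, hsp, hq])]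
              simp
            have hmlt : m < (c :: rest).length := by
              have hlen : m + ((c :: rest).dropWhile pvOrd).length = (c :: rest).length := by
                have h := congrArg List.length
                  (List.takeWhile_append_dropWhile (p := pvOrd) (l := c :: rest))
                rw [List.length_append] at h
                rw [hmdef]
                exact h
              have : 0 < ((c :: rest).dropWhile pvOrd).length := List.length_pos_of_ne_nil hdnil
              omega
            have hslice : PySem.List.slice (c :: rest) (some ((m : Nat) : Int)) none =
                (c :: rest).drop m := PySem.List.slice_from_natCast _ _
            have hlen2 : ((c :: rest).drop m).length ≤ N := by
              simp only [List.length_drop, List.length_cons] at *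
              omega
            rw [hslice, ih _ hlen2]
            rw [pvSpecA_run (c :: rest), ← hmdef, pvDropWhile_eq_drop, ← hmdef]
            push_cast; ring

-- A-side characterisation (unchanged from the A port's loop shape)
lemma pvDrop_nil {l : List Char} {i : Int} (hi : (l.length : Int) ≤ i) (h0 : 0 ≤ i) :
    l.drop i.toNat = [] := by
  apply List.drop_eq_nil_of_le; omega

lemma pvALoop_spec (s : String) : ∀ (f : Nat) (i : Int) (q : Bool), 0 ≤ i →
    ((s.toList.length : Int) - i).toNat ≤ f →
    pvALoop s (s.toList.length : Int) f i q = i + (pvSpecA (s.toList.drop i.toNat) q : Int) := by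
  intro f
  induction f with
  | zero =>
    intro i q h0 hf
    have hlen : (s.toList.length : Int) ≤ i := by omega
    rw [pvDrop_nil hlen h0]
    simp [pvALoop, pvSpecA]
  | succ f ih =>
    intro i q h0 hf
    by_cases hlt : i < (s.toList.length : Int)
    · have hn : i.toNat < s.toList.length := by omega
      have hget : PySem.Str.pyGet? s i = some (s.toList[i.toNat]) := by
        simp only [PySem.Str.pyGet?, PySem.Chars.pyGet?]
        exact PySem.List.pyGet?_eq_some_getElem _ h0 (by omega)
      have hdrop : s.toList.drop i.toNat = s.toList[i.toNat] :: s.toList.drop (i.toNat + 1) :=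
        List.drop_eq_getElem_cons hn
      set c := s.toList[i.toNat] with hc
      by_cases hcond : (c != ' ' || q) = true
      · have h1 : (i + 1).toNat = i.toNat + 1 := by omega
        have hrec := ih (i + 1) (if c == '"' then !q else q) (by omega) (by omega)
        simp only [pvALoop, hlt, if_pos, hget, hcond, if_true]
        rw [hrec, hdrop]
        simp only [pvSpecA, hcond, if_true, h1]
        push_cast; ring
      · simp only [pvALoop, hlt, if_pos, hget, hcond, if_false]
        rw [hdrop]
        simp only [pvSpecA, hcond, if_false]
        simp
    · have hlen : (s.toList.length : Int) ≤ i := by omega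
      rw [pvDrop_nil hlen h0]
      simp only [pvALoop]
      rw [if_neg hlt]
      simp [pvSpecA]

-- ===== VERDICT (by name: the statement is the Claim_ definition above) =====
theorem get_within_spaces_py_spec : Claim_equal_get_within_spaces_py := by
  intro s start _hdom hpre
  unfold Spec_get_within_spaces_py
  unfold get_within_spaces_py get_within_spaces_py_alt
  have hL : PySem.Str.len s = (s.toList.length : Int) := rfl
  have hsuf : PySem.Chars.slice s.toList (some start) none = s.toList.drop start.toNat := by
    rw [PySem.Chars.slice_eq_listSlice]
    exact PySem.List.slice_from _ hpre
  rw [hL, pvALoop_spec s _ start false hpre le_rfl, hsuf,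
    pvBLoop_spec (s.toList.drop start.toNat).length _ le_rfl 0]
  ring
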